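-- pv_equiv track=rewrite | github.com/Sandi784-boot/mytrenhome | pakoworld&alright.py | find_best_subcollection
-- ===== SOURCE A (Python) =====
-- def find_best_subcollection(text_to_check, subcollection_dict):
--     """Find BEST matching subcollection (longest/most specific keyword)"""
--     text_lower = text_to_check.lower()
--
--     matches = []
--     for sub_tag, keywords in subcollection_dict.items():
--         for keyword in keywords:
--             if keyword in text_lower:
--                 matches.append((sub_tag, len(keyword)))
--
--     if matches:
--         matches.sort(key=lambda x: x[1], reverse=True)
--         return matches[0][0]
--
--     return None
-- ===== SOURCE B (Python) =====
-- def find_best_subcollection(text_to_check, subcollection_dict):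
--     """Find BEST matching subcollection (longest/most specific keyword)"""
--     text_lower = text_to_check.lower()
--     best_tag = None
--     best_len = -1
--     for sub_tag, keywords in subcollection_dict.items():
--         for keyword in keywords:
--             if keyword in text_lower and len(keyword) > best_len:
--                 best_tag = sub_tag
--                 best_len = len(keyword)
--     return best_tag
-- ===== Notes on version B (the rewrite author's own statement) =====
-- stated objective: simpler
-- what changed: Replaces collect-all-matches-then-stable-sort-descending-and-take-first with a single-pass running maximum (strict > so the first longest match still wins); no intermediate list and no sort.
import Mathlib
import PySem

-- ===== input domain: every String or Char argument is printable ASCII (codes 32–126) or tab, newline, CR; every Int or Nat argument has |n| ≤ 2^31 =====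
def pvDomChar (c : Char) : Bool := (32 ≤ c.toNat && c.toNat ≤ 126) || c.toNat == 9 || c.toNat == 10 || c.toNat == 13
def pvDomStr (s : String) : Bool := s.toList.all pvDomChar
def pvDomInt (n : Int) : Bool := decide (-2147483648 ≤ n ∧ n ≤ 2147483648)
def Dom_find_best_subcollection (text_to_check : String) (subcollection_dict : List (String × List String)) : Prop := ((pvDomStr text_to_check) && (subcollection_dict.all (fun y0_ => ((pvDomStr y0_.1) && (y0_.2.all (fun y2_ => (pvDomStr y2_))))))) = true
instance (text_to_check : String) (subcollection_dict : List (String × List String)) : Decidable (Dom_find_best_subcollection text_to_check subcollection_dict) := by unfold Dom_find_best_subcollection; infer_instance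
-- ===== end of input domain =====

-- ===== PORT A =====
-- Port of A: build the list of (tag, len keyword) matches, stable-sort it by length
-- descending, return the first tag (None when no match).
def find_best_subcollection (text_to_check : String) (subcollection_dict : List (String × List String)) : Option String :=
  let text_lower := PySem.Str.lower text_to_check
  let ms := subcollection_dict.foldl
    (fun acc p => p.2.foldl
      (fun acc keyword =>
        if PySem.Str.isIn keyword text_lower then acc ++ [(p.1, PySem.Str.len keyword)] else acc)
      acc)
    ([] : List (String × Int))
  if ms.isEmpty then none
  else
    match PySem.List.sorted ms (fun x => x.2) true with
    | [] => none
    | m :: _ => some m.1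

-- ===== PORT B =====
-- Port of B: one pass keeping (best_tag, best_len), strict > so the first longest match wins.
def find_best_subcollection_alt (text_to_check : String) (subcollection_dict : List (String × List String)) : Option String :=
  let text_lower := PySem.Str.lower text_to_check
  let st := subcollection_dict.foldl
    (fun (st : Option String × Int) p => p.2.foldl
      (fun (st : Option String × Int) keyword =>
        if PySem.Str.isIn keyword text_lower && decide (st.2 < PySem.Str.len keyword)
        then (some p.1, PySem.Str.len keyword) else st)
      st)
    ((none, -1) : Option String × Int)
  st.1

-- ===== PRECONDITION & SPEC =====
def Spec_find_best_subcollection (text_to_check : String) (subcollection_dict : List (String × List String)) (out : Option String) : Prop := out = find_best_subcollection_alt text_to_check subcollection_dict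
instance (text_to_check : String) (subcollection_dict : List (String × List String)) (out : Option String) : Decidable (Spec_find_best_subcollection text_to_check subcollection_dict out) := by unfold Spec_find_best_subcollection; infer_instance

-- ===== CLAIM (what is proved, stated in full; the proofs are below) =====
def Claim_equal_find_best_subcollection : Prop := ∀ (text_to_check : String) (subcollection_dict : List (String × List String)), Dom_find_best_subcollection text_to_check subcollection_dict → Spec_find_best_subcollection text_to_check subcollection_dict (find_best_subcollection text_to_check subcollection_dict)

-- ===== LEMMAS AND PROOFS =====

-- running max with strict >: the first maximal element wins
def rmStep (st : Option (String × Int)) (x : String × Int) : Option (String × Int) :=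
  match st with
  | none => some x
  | some m => if m.2 < x.2 then some x else some m

-- B's state as a view of the running-max state
def toB (o : Option (String × Int)) : Option String × Int :=
  match o with
  | none => (none, -1)
  | some m => (some m.1, m.2)

lemma toB_fst (o : Option (String × Int)) : (toB o).1 = o.map Prod.fst := by
  cases o <;> rfl

lemma head?_insertBy {α : Type} (bef : α → α → Bool) (x : α) (acc : List α) :
    (PySem.List.insertBy bef x acc).head? =
      some (match acc.head? with | none => x | some y => if bef x y then x else y) := by
  cases acc with
  | nil => rfl
  | cons y ys =>
    simp only [PySem.List.insertBy]
    split <;> rename_i hb <;> simp [List.head?, hb]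

lemma foldl_insertBy_head? (ms : List (String × Int)) :
    ∀ acc : List (String × Int),
      (ms.foldl (fun acc x => PySem.List.insertBy (fun a b => decide (b.2 < a.2)) x acc) acc).head?
        = ms.foldl rmStep acc.head? := by
  induction ms with
  | nil => intro acc; rfl
  | cons x ms ih =>
    intro acc
    simp only [List.foldl_cons, ih, head?_insertBy]
    congr 1
    cases h : acc.head? with
    | none => rfl
    | some y => simp only [rmStep]; split <;> simp_all

-- head of A's descending stable sort = running max with strict >
lemma A_head (ms : List (String × Int)) :
    (match PySem.List.sorted ms (fun x => x.2) true with
     | [] => none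
     | m :: _ => some m.1)
      = (ms.foldl rmStep none).map Prod.fst := by
  rw [PySem.List.sorted_rev_eq_foldl_insertBy]
  have h := foldl_insertBy_head? ms []
  cases hh : (ms.foldl (fun acc x => PySem.List.insertBy (fun a b => decide (b.2 < a.2)) x acc) []) with
  | nil => rw [hh] at h; simp at h; rw [← h]; rfl
  | cons m t => rw [hh] at h; simp at h; rw [← h]; rfl

lemma innerA_append (tl tag : String) (kws : List String) :
    ∀ acc : List (String × Int),
      kws.foldl (fun acc keyword =>
          if PySem.Str.isIn keyword tl then acc ++ [(tag, PySem.Str.len keyword)] else acc) acc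
        = acc ++ kws.foldl (fun acc keyword =>
          if PySem.Str.isIn keyword tl then acc ++ [(tag, PySem.Str.len keyword)] else acc) [] := by
  induction kws with
  | nil => intro acc; simp
  | cons kw kws ih =>
    intro acc
    simp only [List.foldl_cons]
    by_cases h : PySem.Str.isIn kw tl
    · rw [if_pos h, if_pos h, ih (acc ++ [(tag, PySem.Str.len kw)]),
        ih ([] ++ [(tag, PySem.Str.len kw)])]
      simp
    · rw [if_neg h, if_neg h]
      exact ih acc

lemma outerA_append (tl : String) (d : List (String × List String)) :
    ∀ acc : List (String × Int),
      d.foldl (fun acc p => p.2.foldl (fun acc keyword =>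
          if PySem.Str.isIn keyword tl then acc ++ [(p.1, PySem.Str.len keyword)] else acc) acc) acc
        = acc ++ d.foldl (fun acc p => p.2.foldl (fun acc keyword =>
          if PySem.Str.isIn keyword tl then acc ++ [(p.1, PySem.Str.len keyword)] else acc) acc) [] := by
  induction d with
  | nil => intro acc; simp
  | cons p d ih =>
    intro acc
    simp only [List.foldl_cons]
    rw [innerA_append tl p.1 p.2 acc, ih, ih (p.2.foldl _ [])]
    simp

lemma innerB_eq (tl tag : String) (kws : List String) :
    ∀ o : Option (String × Int),
      kws.foldl (fun (st : Option String × Int) keyword =>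
          if PySem.Str.isIn keyword tl && decide (st.2 < PySem.Str.len keyword)
          then (some tag, PySem.Str.len keyword) else st) (toB o)
        = toB ((kws.foldl (fun acc keyword =>
            if PySem.Str.isIn keyword tl then acc ++ [(tag, PySem.Str.len keyword)] else acc) []).foldl rmStep o) := by
  induction kws with
  | nil => intro o; rfl
  | cons kw kws ih =>
    intro o
    simp only [List.foldl_cons]
    by_cases h : PySem.Str.isIn kw tl
    · have hstep : (if PySem.Str.isIn kw tl && decide ((toB o).2 < PySem.Str.len kw)
          then (some tag, PySem.Str.len kw) else toB o) = toB (rmStep o (tag, PySem.Str.len kw)) := by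
        cases o with
        | none =>
          simp only [toB, rmStep, h, Bool.true_and, PySem.Str.len_eq, decide_eq_true_eq]
          rw [if_pos (by omega)]
        | some m =>
          simp only [toB, rmStep, h, Bool.true_and, decide_eq_true_eq]
          by_cases hm : m.2 < PySem.Str.len kw
          · rw [if_pos hm, if_pos hm]
          · rw [if_neg hm, if_neg hm]
      rw [hstep, ih, if_pos h,
        innerA_append tl tag kws ([] ++ [(tag, PySem.Str.len kw)]), List.foldl_append]
      rfl
    · simp only [h, Bool.false_and, if_false, Bool.false_eq_true]
      rw [ih]

lemma outerB_eq (tl : String) (d : List (String × List String)) :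
    ∀ o : Option (String × Int),
      d.foldl (fun (st : Option String × Int) p => p.2.foldl
          (fun (st : Option String × Int) keyword =>
            if PySem.Str.isIn keyword tl && decide (st.2 < PySem.Str.len keyword)
            then (some p.1, PySem.Str.len keyword) else st) st) (toB o)
        = toB ((d.foldl (fun acc p => p.2.foldl (fun acc keyword =>
            if PySem.Str.isIn keyword tl then acc ++ [(p.1, PySem.Str.len keyword)] else acc) acc) []).foldl rmStep o) := by
  induction d with
  | nil => intro o; rfl
  | cons p d ih =>
    intro o
    simp only [List.foldl_cons]
    rw [innerB_eq tl p.1 p.2 o, ih,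
      outerA_append tl d (p.2.foldl (fun acc keyword =>
        if PySem.Str.isIn keyword tl then acc ++ [(p.1, PySem.Str.len keyword)] else acc) []),
      List.foldl_append]

-- ===== VERDICT (by name: the statement is the Claim_ definition above) =====
theorem find_best_subcollection_spec : Claim_equal_find_best_subcollection := by
  intro t d _
  unfold Spec_find_best_subcollection
  have hA : find_best_subcollection t d =
      (if (d.foldl (fun acc p => p.2.foldl (fun acc keyword =>
            if PySem.Str.isIn keyword (PySem.Str.lower t) then acc ++ [(p.1, PySem.Str.len keyword)] else acc) acc)
            ([] : List (String × Int))).isEmpty then none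
       else
         match PySem.List.sorted (d.foldl (fun acc p => p.2.foldl (fun acc keyword =>
            if PySem.Str.isIn keyword (PySem.Str.lower t) then acc ++ [(p.1, PySem.Str.len keyword)] else acc) acc)
            ([] : List (String × Int))) (fun x => x.2) true with
         | [] => none
         | m :: _ => some m.1) := rfl
  have hB : find_best_subcollection_alt t d =
      (d.foldl (fun (st : Option String × Int) p => p.2.foldl
          (fun (st : Option String × Int) keyword =>
            if PySem.Str.isIn keyword (PySem.Str.lower t) && decide (st.2 < PySem.Str.len keyword)
            then (some p.1, PySem.Str.len keyword) else st) st)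
        (toB none)).1 := rfl
  rw [hA, hB, outerB_eq (PySem.Str.lower t) d none, toB_fst]
  by_cases he : (d.foldl (fun acc p => p.2.foldl (fun acc keyword =>
      if PySem.Str.isIn keyword (PySem.Str.lower t) then acc ++ [(p.1, PySem.Str.len keyword)] else acc) acc)
      ([] : List (String × Int))).isEmpty
  · rw [if_pos he, List.isEmpty_iff.mp he]
    rfl
  · rw [if_neg he]
    exact A_head _
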